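-- pv_equiv track=rewrite | github.com/liupengsay/PyIsTheBestLang | algorithm/src/basis/two_pointer.py | lc_6392
-- ===== SOURCE A (Python) =====
-- from math import gcd
-- from typing import List
--
-- INF = int(1e64)
--
-- class SlidingWindowAggregation:
--     """SlidingWindowAggregation
--
--     Api:
--     1. append value to tail,O(1).
--     2. pop value from head,O(1).
--     3. query aggregated value in window,O(1).
--     """
--
--     def __init__(self, e, op):
--         # 模板：滑动窗口维护和查询聚合信息
--         """
--         Args:
--             e: unit element
--             op: merge function
--         """
--         self.stack0 = []
--         self.agg0 = []
--         self.stack2 = []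
--         self.stack3 = []
--         self.e = e
--         self.e0 = self.e
--         self.e1 = self.e
--         self.size = 0
--         self.op = op
--
--     def append(self, value) -> None:
--         if not self.stack0:
--             self.push0(value)
--             self.transfer()
--         else:
--             self.push1(value)
--         self.size += 1
--
--     def popleft(self) -> None:
--         if not self.size:
--             return
--         if not self.stack0:
--             self.transfer()
--         self.stack0.pop()
--         self.stack2.pop()
--         self.e0 = self.stack2[-1] if self.stack2 else self.e
--         self.size -= 1
--
--     def query(self):
--         return self.op(self.e0, self.e1)
--
--     def push0(self, value):
--         self.stack0.append(value)
--         self.e0 = self.op(value, self.e0)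
--         self.stack2.append(self.e0)
--
--     def push1(self, value):
--         self.agg0.append(value)
--         self.e1 = self.op(self.e1, value)
--         self.stack3.append(self.e1)
--
--     def transfer(self):
--         while self.agg0:
--             self.push0(self.agg0.pop())
--         while self.stack3:
--             self.stack3.pop()
--         self.e1 = self.e
--
--     def __len__(self):
--         return self.size
--
-- def lc_6392(nums: List[int]) -> int:
--     # 模板：滑动窗口维护区间 gcd 为 1 的长度信息
--     if gcd(*nums) != 1:
--         return -1
--     if 1 in nums:
--         return len(nums) - nums.count(1)
--
--     swa = SlidingWindowAggregation(0, gcd)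
--     res, n = INF, len(nums)
--     # 枚举右端点
--     for i in range(n):
--         swa.append(nums[i])
--         while swa and swa.query() == 1:
--             res = res if res < swa.size else swa.size
--             swa.popleft()
--     return res - 1 + len(nums) - 1
-- ===== SOURCE B (Python) =====
-- from math import gcd
--
-- def lc_6392(nums):
--     g = 0
--     for x in nums:
--         g = gcd(g, x)
--     if g != 1:
--         return -1
--     if 1 in nums:
--         return len(nums) - nums.count(1)
--     best = int(1e64)
--     prefix = []
--     for x in nums:
--         prefix.append(x)
--         h = 0
--         length = 0
--         for y in reversed(prefix):
--             h = gcd(h, y)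
--             length += 1
--             if h == 1:
--                 if length < best:
--                     best = length
--                 break
--     return best - 1 + len(nums) - 1
-- ===== Notes on version B (the rewrite author's own statement) =====
-- stated objective: simpler
-- what changed: Replaces A's SlidingWindowAggregation class (four stacks, aggregate transfers) and two-pointer sweep by a plain per-prefix backward scan that finds the shortest gcd-1 suffix of each prefix with an early break; guards and final formula unchanged.
import Mathlib
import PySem

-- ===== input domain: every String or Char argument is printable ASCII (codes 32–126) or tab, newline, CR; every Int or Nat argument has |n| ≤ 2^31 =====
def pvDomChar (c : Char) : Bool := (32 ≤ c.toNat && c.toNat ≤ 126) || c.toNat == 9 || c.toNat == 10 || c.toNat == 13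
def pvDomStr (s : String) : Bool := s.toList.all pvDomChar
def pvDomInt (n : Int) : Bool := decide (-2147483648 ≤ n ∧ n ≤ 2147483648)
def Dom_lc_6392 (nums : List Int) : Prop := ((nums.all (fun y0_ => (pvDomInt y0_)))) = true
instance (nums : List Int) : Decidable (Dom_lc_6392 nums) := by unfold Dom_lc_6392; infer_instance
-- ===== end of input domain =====

-- B replaces A's SlidingWindowAggregation two-pointer sweep by a per-prefix backward scan for the
-- shortest gcd-1 suffix (objective: simpler; not claimed faster).

-- ===== PORT A =====

-- math.gcd(a, b) : nonnegative gcd of absolute values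
def pygcd (a b : Int) : Int := (Int.gcd a b : Int)

def INF : Int := 10000000000000000213204190094543968723012578712679649467743338496  -- int(1e64)

-- SlidingWindowAggregation state specialised to e = 0, op = gcd (the instance A builds).
-- Python lists used as stacks (append/pop at the end) are Lean lists with the top at the HEAD.
structure SWAS where
  stack0 : List Int
  agg0   : List Int
  stack2 : List Int
  stack3 : List Int
  e0 : Int
  e1 : Int
  size : Nat          -- window size; Python int, always ≥ 0 (incremented/decremented in step)
deriving Repr

def push0 (v : Int) (s : SWAS) : SWAS :=
  { s with stack0 := v :: s.stack0, e0 := pygcd v s.e0, stack2 := pygcd v s.e0 :: s.stack2 }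

def push1 (v : Int) (s : SWAS) : SWAS :=
  { s with agg0 := v :: s.agg0, e1 := pygcd s.e1 v, stack3 := pygcd s.e1 v :: s.stack3 }

-- 'while self.agg0: self.push0(self.agg0.pop())' — loop over the agg0 stack
def transferLoop : List Int → SWAS → SWAS
  | [], s => s
  | v :: t, s => transferLoop t (push0 v { s with agg0 := t })

-- transfer: move agg0 into stack0, empty stack3, reset e1 to the unit 0
def transfer (s : SWAS) : SWAS :=
  let s := transferLoop s.agg0 s
  { s with stack3 := [], e1 := 0 }

def SWAS.append (v : Int) (s : SWAS) : SWAS :=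
  if s.stack0.isEmpty then
    let s := transfer (push0 v s)
    { s with size := s.size + 1 }
  else
    let s := push1 v s
    { s with size := s.size + 1 }

-- Python pops stack0/stack2; they are nonempty whenever size > 0 (invariant), so tail/headD are exact
def SWAS.popleft (s : SWAS) : SWAS :=
  if s.size = 0 then s
  else
    let s := if s.stack0.isEmpty then transfer s else s
    let s := { s with stack0 := s.stack0.tail, stack2 := s.stack2.tail }
    { s with e0 := s.stack2.headD 0, size := s.size - 1 }

def SWAS.query (s : SWAS) : Int := pygcd s.e0 s.e1

-- 'while swa and swa.query() == 1: res = res if res < swa.size else swa.size; swa.popleft()'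
-- fuel only makes the loop total; fuel = swa.size suffices since each popleft decrements size
def innerA : Nat → Int → SWAS → Int × SWAS
  | 0, res, s => (res, s)
  | fuel + 1, res, s =>
    if s.size ≠ 0 ∧ s.query = 1 then
      innerA fuel (if res < (s.size : Int) then res else (s.size : Int)) s.popleft
    else (res, s)

def stepA (acc : Int × SWAS) (x : Int) : Int × SWAS :=
  let s := SWAS.append x acc.2
  innerA s.size acc.1 s

def lc_6392 (nums : List Int) : Int :=
  if List.foldl pygcd 0 nums ≠ 1 then -1          -- gcd(*nums) != 1
  else if nums.contains 1 then (nums.length : Int) - (PySem.List.count nums 1 : Int)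
  else
    let n := nums.length
    let r := nums.foldl stepA (INF, ⟨[], [], [], [], 0, 0, 0⟩)
    r.1 - 1 + (n : Int) - 1

-- ===== PORT B =====

-- inner loop of Source B: scan reversed(prefix), g accumulates the gcd, break at the first gcd 1
def scanB : Int → Int → Int → List Int → Int
  | _, _, best, [] => best
  | g, len, best, y :: t =>
    let g' := pygcd g y
    let len' := len + 1
    if g' = 1 then (if len' < best then len' else best)
    else scanB g' len' best t

-- Source B keeps 'prefix' and iterates reversed(prefix); the port carries the reversed prefix directly
def stepB (acc : Int × List Int) (x : Int) : Int × List Int :=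
  let rp := x :: acc.2
  (scanB 0 0 acc.1 rp, rp)

def lc_6392_alt (nums : List Int) : Int :=
  if List.foldl pygcd 0 nums ≠ 1 then -1
  else if nums.contains 1 then (nums.length : Int) - (PySem.List.count nums 1 : Int)
  else
    let r := nums.foldl stepB (INF, [])
    r.1 - 1 + (nums.length : Int) - 1

-- ===== PRECONDITION & SPEC =====
def Spec_lc_6392 (nums : List Int) (out : Int) : Prop := out = lc_6392_alt nums
instance (nums : List Int) (out : Int) : Decidable (Spec_lc_6392 nums out) := by unfold Spec_lc_6392; infer_instance

-- ===== CLAIM (what is proved, stated in full; the proofs are below) =====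
def Claim_equal_lc_6392 : Prop := ∀ (nums : List Int), Dom_lc_6392 nums → Spec_lc_6392 nums (lc_6392 nums)

-- ===== LEMMAS AND PROOFS =====

-- ---- gcd algebra ----
theorem pygcd_nonneg (a b : Int) : 0 ≤ pygcd a b := by simp [pygcd]

theorem pygcd_comm (a b : Int) : pygcd a b = pygcd b a := by
  simp [pygcd, Int.gcd_comm]

theorem pygcd_assoc (a b c : Int) : pygcd (pygcd a b) c = pygcd a (pygcd b c) := by
  simp [pygcd, Int.gcd, Nat.gcd_assoc]

theorem pygcd_zero_right {a : Int} (h : 0 ≤ a) : pygcd a 0 = a := by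
  simp [pygcd, Int.gcd]; omega

theorem pygcd_one_right (a : Int) : pygcd a 1 = 1 := by simp [pygcd, Int.gcd]

theorem pygcd_abs_left (a b : Int) : pygcd (pygcd 0 a) b = pygcd a b := by
  simp [pygcd, Int.gcd, Int.natAbs_abs]

-- gcd of a list, as A's and B's folds compute it
def gl (xs : List Int) : Int := xs.foldl pygcd 0

theorem foldl_pygcd_init (xs : List Int) : ∀ a : Int, 0 ≤ a →
    xs.foldl pygcd a = pygcd a (gl xs) := by
  induction xs with
  | nil => intro a ha; simp [gl, pygcd_zero_right ha]
  | cons x t ih =>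
    intro a ha
    have h1 : (x :: t).foldl pygcd a = pygcd (pygcd a x) (gl t) := by
      simpa using ih (pygcd a x) (pygcd_nonneg a x)
    have h2 : gl (x :: t) = pygcd x (gl t) := by
      have := ih (pygcd 0 x) (pygcd_nonneg 0 x)
      simpa [gl, pygcd_abs_left] using this
    rw [h1, h2, pygcd_assoc]

theorem gl_cons (x : Int) (t : List Int) : gl (x :: t) = pygcd x (gl t) := by
  have := foldl_pygcd_init t (pygcd 0 x) (pygcd_nonneg 0 x)
  simpa [gl, pygcd_abs_left] using this

theorem gl_nonneg (xs : List Int) : 0 ≤ gl xs := by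
  cases xs with
  | nil => simp [gl]
  | cons x t => rw [gl_cons]; exact pygcd_nonneg _ _

theorem gl_append (xs ys : List Int) : gl (xs ++ ys) = pygcd (gl xs) (gl ys) := by
  rw [gl, List.foldl_append]
  exact foldl_pygcd_init ys (gl xs) (gl_nonneg xs)

theorem foldr_eq_gl (xs : List Int) : xs.foldr pygcd 0 = gl xs := by
  induction xs with
  | nil => rfl
  | cons x t ih => simp [List.foldr, ih, gl_cons]

theorem gl_one_of_suffix {u w : List Int} (h : gl w = 1) : gl (u ++ w) = 1 := by
  rw [gl_append, h, pygcd_one_right]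

-- ---- longest suffix with gcd ≠ 1 (the window left by A's inner while-loop) ----
def lns : List Int → List Int
  | [] => []
  | x :: t => if gl (x :: t) = 1 then lns t else x :: t

theorem gl_lns_ne_one (w : List Int) : gl (lns w) ≠ 1 := by
  induction w with
  | nil => simp [lns, gl]
  | cons x t ih =>
    by_cases h : gl (x :: t) = 1
    · simpa [lns, h] using ih
    · simp [lns, h]

theorem lns_suffix (w : List Int) : ∃ v, w = v ++ lns w := by
  induction w with
  | nil => exact ⟨[], rfl⟩
  | cons x t ih =>
    by_cases h : gl (x :: t) = 1
    · obtain ⟨v, hv⟩ := ih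
      exact ⟨x :: v, by simp [lns, h, ← hv]⟩
    · exact ⟨[], by simp [lns, h]⟩

theorem lns_length_le (w : List Int) : (lns w).length ≤ w.length := by
  obtain ⟨v, hv⟩ := lns_suffix w
  have h := congrArg List.length hv
  simp only [List.length_append] at h
  omega

theorem lns_eq_self {w : List Int} (h : gl w ≠ 1) : lns w = w := by
  cases w with
  | nil => rfl
  | cons x t => simp [lns, h]

theorem lns_ne_self {w : List Int} (h : gl w = 1) : lns w ≠ w := by
  intro he
  apply gl_lns_ne_one w
  rw [he]; exact h

theorem lns_cons_of_one {x : Int} {t : List Int} (h : gl (x :: t) = 1) :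
    lns (x :: t) = lns t := by simp [lns, h]

theorem lns_append_of_one {w : List Int} (u : List Int) (h : gl w = 1) :
    lns (u ++ w) = lns w := by
  induction u with
  | nil => rfl
  | cons a u' ih =>
    have h1 : gl (a :: (u' ++ w)) = 1 := by
      have := gl_one_of_suffix (u := a :: u') h
      simpa using this
    simpa [lns_cons_of_one h1] using ih

theorem suffix_lns_of_ne_one {w : List Int} (u : List Int) (h : gl w ≠ 1) :
    ∃ v, lns (u ++ w) = v ++ w := by
  induction u with
  | nil => exact ⟨[], by simpa using lns_eq_self h⟩
  | cons a u' ih =>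
    by_cases h1 : gl (a :: (u' ++ w)) = 1
    · obtain ⟨v, hv⟩ := ih
      refine ⟨v, ?_⟩
      have : lns ((a :: u') ++ w) = lns (u' ++ w) := by
        simpa using lns_cons_of_one h1
      rw [this, hv]
    · exact ⟨a :: u', by simp [lns, h1]⟩

-- ---- SWA invariant ----
def e0spec (xs : List Int) : Int := xs.foldr pygcd 0

def aggs : List Int → List Int
  | [] => []
  | v :: t => pygcd v (e0spec t) :: aggs t

def W (s : SWAS) : List Int := s.stack0 ++ s.agg0.reverse

def SInv (s : SWAS) : Prop :=
  s.size = s.stack0.length + s.agg0.length ∧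
  s.e0 = e0spec s.stack0 ∧
  s.e1 = s.agg0.reverse.foldl pygcd 0 ∧
  s.stack2 = aggs s.stack0

theorem aggs_headD (xs : List Int) : (aggs xs).headD 0 = e0spec xs := by
  cases xs with
  | nil => rfl
  | cons v t => simp [aggs, e0spec, List.foldr]

theorem transferLoop_spec (ag : List Int) : ∀ s : SWAS, s.agg0 = ag →
    (transferLoop ag s).stack0 = ag.reverse ++ s.stack0 ∧
    (transferLoop ag s).agg0 = [] ∧
    (transferLoop ag s).e1 = s.e1 ∧
    (transferLoop ag s).size = s.size ∧
    (s.e0 = e0spec s.stack0 ∧ s.stack2 = aggs s.stack0 →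
      (transferLoop ag s).e0 = e0spec (transferLoop ag s).stack0 ∧
      (transferLoop ag s).stack2 = aggs (transferLoop ag s).stack0) := by
  induction ag with
  | nil => intro s hs; refine ⟨by simp [transferLoop], by simp [transferLoop, hs], rfl, rfl, fun h => by simpa [transferLoop] using h⟩
  | cons v t ih =>
    intro s hs
    have h := ih (push0 v { s with agg0 := t }) (by simp [push0])
    obtain ⟨h1, h2, h3, h4, h5⟩ := h
    refine ⟨?_, by simpa [transferLoop] using h2, by simpa [transferLoop, push0] using h3,
      by simpa [transferLoop, push0] using h4, ?_⟩
    · show (transferLoop t _).stack0 = _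
      rw [h1]; simp [push0]
    · rintro ⟨he0, hst2⟩
      have : (push0 v { s with agg0 := t }).e0 = e0spec (push0 v { s with agg0 := t }).stack0 ∧
          (push0 v { s with agg0 := t }).stack2 = aggs (push0 v { s with agg0 := t }).stack0 := by
        constructor
        · simp [push0, e0spec, he0]
        · simp [push0, aggs, hst2, he0]
      exact h5 this

theorem query_eq {s : SWAS} (h : SInv s) : s.query = gl (W s) := by
  obtain ⟨_, h2, h3, _⟩ := h
  rw [SWAS.query, h2, h3, W, gl_append]
  congr 1
  exact foldr_eq_gl s.stack0

theorem aggs_tail (xs : List Int) : (aggs xs).tail = aggs xs.tail := by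
  cases xs <;> simp [aggs]

theorem append_spec {s : SWAS} (h : SInv s) (v : Int) :
    SInv (SWAS.append v s) ∧ W (SWAS.append v s) = W s ++ [v] ∧
    (SWAS.append v s).size = s.size + 1 := by
  obtain ⟨st, ag, s2, s3, e0, e1, sz⟩ := s
  obtain ⟨h1, h2, h3, h4⟩ := h
  simp only [SInv, W] at h1 h2 h3 h4 ⊢
  cases st with
  | nil =>
    have h2' : e0 = 0 := h2
    have h4' : s2 = [] := h4
    subst h2' h4'
    obtain ⟨t1, t2, t3, t4, t5⟩ :=
      transferLoop_spec ag (⟨[v], ag, [pygcd v 0], s3, pygcd v 0, e1, sz⟩ : SWAS) rfl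
    obtain ⟨t6, t7⟩ := t5 (by constructor <;> simp [e0spec, aggs])
    simp only [SWAS.append, push0, transfer, List.isEmpty_nil, if_true]
    refine ⟨⟨?_, ?_, ?_, ?_⟩, ?_, ?_⟩
    · rw [t4, t1, t2]
      simp at h1 ⊢
      omega
    · exact t6
    · rw [t2]
      rfl
    · exact t7
    · rw [t1, t2]
      simp
    · rw [t4]
  | cons c t =>
    simp only [SWAS.append, push1, List.isEmpty_cons, Bool.false_eq_true, if_false]
    refine ⟨⟨?_, ?_, ?_, ?_⟩, ?_, ?_⟩
    · simp at h1 ⊢; omega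
    · exact h2
    · simp only [List.reverse_cons, List.foldl_append, List.foldl_cons, List.foldl_nil, h3]
    · exact h4
    · simp
    · simp

theorem popleft_spec {s : SWAS} (h : SInv s) (hpos : s.size ≠ 0) :
    SInv s.popleft ∧ W s.popleft = (W s).tail ∧ s.popleft.size = s.size - 1 := by
  obtain ⟨st, ag, s2, s3, e0, e1, sz⟩ := s
  obtain ⟨h1, h2, h3, h4⟩ := h
  simp only [SInv, W] at h1 h2 h3 h4 ⊢
  have hpos' : sz ≠ 0 := hpos
  cases st with
  | nil =>
    have h2' : e0 = 0 := h2
    have h4' : s2 = [] := h4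
    subst h2' h4'
    obtain ⟨t1, t2, t3, t4, t5⟩ :=
      transferLoop_spec ag (⟨[], ag, [], s3, 0, e1, sz⟩ : SWAS) rfl
    obtain ⟨t6, t7⟩ := t5 ⟨rfl, rfl⟩
    simp only [SWAS.popleft, transfer, List.isEmpty_nil, if_true, if_neg hpos']
    refine ⟨⟨?_, ?_, ?_, ?_⟩, ?_, ?_⟩
    · have h1' : sz = ag.length := by simpa using h1
      rw [t4, t1, t2]
      simp
      omega
    · rw [t7, t1, aggs_tail, aggs_headD]
    · rw [t2]
      rfl
    · rw [t7, t1, aggs_tail]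
    · rw [t1, t2]
      simp
    · rw [t4]
  | cons c t =>
    simp only [SWAS.popleft, List.isEmpty_cons, Bool.false_eq_true, if_false, if_neg hpos']
    refine ⟨⟨?_, ?_, ?_, ?_⟩, ?_, ?_⟩
    · simp at h1 ⊢; omega
    · rw [h4, aggs_tail, aggs_headD, List.tail_cons]
    · exact h3
    · rw [h4, aggs_tail, List.tail_cons]
    · simp
    · simp

theorem if_min (a b : Int) : (if a < b then a else b) = min a b := by
  rw [Int.min_def]; split_ifs <;> omega

theorem innerA_spec : ∀ (fuel : Nat) (res : Int) (s : SWAS), SInv s →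
    s.size = (W s).length → (W s).length ≤ fuel →
    (innerA fuel res s).1 =
      (if lns (W s) = W s then res else min res ((((lns (W s)).length : Int)) + 1)) ∧
    SInv (innerA fuel res s).2 ∧ W (innerA fuel res s).2 = lns (W s) ∧
    (innerA fuel res s).2.size = (lns (W s)).length := by
  intro fuel
  induction fuel with
  | zero =>
    intro res s h hsz hle
    have hw : W s = [] := List.length_eq_zero_iff.mp (by omega)
    have hl : lns (W s) = W s := by rw [hw]; rfl
    refine ⟨?_, h, hl.symm, ?_⟩
    · rw [hl, if_pos rfl]
      rfl
    · rw [hl]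
      exact hsz
  | succ fuel ih =>
    intro res s h hsz hle
    by_cases hc : s.size ≠ 0 ∧ s.query = 1
    · have hq : gl (W s) = 1 := by rw [← query_eq h]; exact hc.2
      have hlw : lns (W s) ≠ W s := lns_ne_self hq
      obtain ⟨hp, hWp, hszp⟩ := popleft_spec h hc.1
      cases hws : W s with
      | nil => exact absurd (by rw [hws]; rfl : (W s).length = 0) (by omega)
      | cons x t =>
        rw [hws] at hq hlw hWp hsz hle
        have hlns : lns (x :: t) = lns t := lns_cons_of_one hq
        have hWp' : W s.popleft = t := by rw [hWp]; rfl
        have hszp' : s.popleft.size = (W s.popleft).length := by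
          rw [hWp', hszp, hsz]; simp
        have hle' : (W s.popleft).length ≤ fuel := by
          rw [hWp']
          simp at hle
          omega
        have hrec := ih (if res < (s.size : Int) then res else (s.size : Int)) s.popleft hp hszp' hle'
        have hstep : innerA (fuel + 1) res s =
            innerA fuel (if res < (s.size : Int) then res else (s.size : Int)) s.popleft := by
          simp only [innerA]
          rw [if_pos hc]
        rw [hstep]
        obtain ⟨r1, r2, r3, r4⟩ := hrec
        rw [hWp'] at r1 r3 r4
        refine ⟨?_, r2, by rw [r3, hlns], by rw [r4, hlns]⟩
        have hlen : (s.size : Int) = (t.length : Int) + 1 := by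
          rw [hsz]; simp
        rw [r1, if_neg hlw, hlns, if_min, hlen]
        by_cases ht : lns t = t
        · rw [if_pos ht, ht]
        · rw [if_neg ht, min_assoc]
          have hcast : ((lns t).length : Int) ≤ (t.length : Int) := by
            exact_mod_cast lns_length_le t
          have hmr : min ((t.length : Int) + 1) (((lns t).length : Int) + 1) =
              ((lns t).length : Int) + 1 := min_eq_right (by omega)
          rw [hmr]
    · have hstep : innerA (fuel + 1) res s = (res, s) := by
        simp only [innerA]
        rw [if_neg hc]
      have hl : lns (W s) = W s := by
        rcases not_and_or.mp hc with h0 | h0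
        · have hw : W s = [] := List.length_eq_zero_iff.mp (by omega)
          rw [hw]; rfl
        · refine lns_eq_self ?_
          rw [← query_eq h]
          exact h0
      rw [hstep]
      refine ⟨?_, h, hl.symm, ?_⟩
      · rw [hl, if_pos rfl]
      · rw [hl]
        exact hsz

theorem scanB_general : ∀ (fr back : List Int) (best : Int), gl back ≠ 1 →
    scanB (gl back) (back.length : Int) best fr =
      (if gl (fr.reverse ++ back) = 1
       then min best (((lns (fr.reverse ++ back)).length : Int) + 1) else best) := by
  intro fr
  induction fr with
  | nil => intro back best hb; simp only [scanB, List.reverse_nil, List.nil_append, if_neg hb]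
  | cons y t ih =>
    intro back best hb
    have hrearr : (y :: t).reverse ++ back = t.reverse ++ (y :: back) := by
      simp
    have hg : pygcd (gl back) y = gl (y :: back) := by rw [gl_cons, pygcd_comm]
    by_cases h1 : gl (y :: back) = 1
    · have hcond : gl ((y :: t).reverse ++ back) = 1 := by
        rw [hrearr]; exact gl_one_of_suffix h1
      have hlns : lns ((y :: t).reverse ++ back) = back := by
        rw [hrearr, lns_append_of_one _ h1, lns_cons_of_one h1, lns_eq_self hb]
      rw [if_pos hcond, hlns]
      simp only [scanB, hg, if_pos h1]
      rw [if_min, min_comm]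
    · have hstep : scanB (gl back) (back.length : Int) best (y :: t) =
          scanB (gl (y :: back)) ((y :: back).length : Int) best t := by
        simp only [scanB, hg, if_neg h1, List.length_cons]
        norm_cast
      rw [hstep, ih (y :: back) best h1, hrearr]

theorem joint : ∀ (rest p u w : List Int) (res best : Int) (s : SWAS),
    SInv s → W s = w → p = u ++ w → gl w ≠ 1 → s.size = w.length →
    (u = [] → res = INF ∧ best = INF) →
    (u ≠ [] → res = best ∧ res ≤ (w.length : Int) + 1) →
    gl (p ++ rest) = 1 →
    (rest.foldl stepA (res, s)).1 = (rest.foldl stepB (best, p.reverse)).1 := by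
  intro rest
  induction rest with
  | nil =>
    intro p u w res best s _ _ hpu hw _ h5 h6 h7
    simp only [List.foldl_nil]
    rcases u with _ | ⟨a, u'⟩
    · exact absurd (by simpa [hpu] using h7) hw
    · exact (h6 (by simp)).1
  | cons x rest' ih =>
    intro p u w res best s hInv hW hpu hw hsz h5 h6 h7
    simp only [List.foldl_cons]
    obtain ⟨a1, a2, a3⟩ := append_spec hInv x
    rw [hW] at a2
    have hsz1 : (SWAS.append x s).size = (W (SWAS.append x s)).length := by
      rw [a2, a3, hsz]; simp
    obtain ⟨i1, i2, i3, i4⟩ := innerA_spec (SWAS.append x s).size res (SWAS.append x s)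
      a1 hsz1 (le_of_eq hsz1.symm)
    rw [a2] at i1 i3 i4
    set w0 := w ++ [x] with hw0
    set s2 := (innerA (SWAS.append x s).size res (SWAS.append x s)).2 with hs2
    set res1 := (innerA (SWAS.append x s).size res (SWAS.append x s)).1 with hres1
    have hstepA : stepA (res, s) x = (res1, s2) := rfl
    have hbval : (stepB (best, p.reverse) x).1 =
        (if gl (p ++ [x]) = 1
         then min best (((lns (p ++ [x])).length : Int) + 1) else best) := by
      show scanB 0 0 best (x :: p.reverse) = _
      have hx : x :: p.reverse = (p ++ [x]).reverse ++ [] := by simp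
      rw [hx]
      have hsg := scanB_general ((p ++ [x]).reverse) [] best (by simp [gl])
      simpa using hsg
    have hstepB2 : (stepB (best, p.reverse) x).2 = (p ++ [x]).reverse := by
      show x :: p.reverse = _
      simp
    have hpu' : p ++ [x] = u ++ w0 := by rw [hpu, hw0, List.append_assoc]
    have hrest : p ++ x :: rest' = (p ++ [x]) ++ rest' := by simp
    rw [hstepA]
    rw [show (stepB (best, p.reverse) x) = ((stepB (best, p.reverse) x).1, (p ++ [x]).reverse) from
      Prod.ext rfl hstepB2]
    by_cases hone : gl w0 = 1
    · have hres1v : res1 = min res (((lns w0).length : Int) + 1) := by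
        rw [i1, if_neg (lns_ne_self hone)]
      have hp1 : gl (p ++ [x]) = 1 := by rw [hpu']; exact gl_one_of_suffix hone
      have hlnsp : lns (p ++ [x]) = lns w0 := by rw [hpu']; exact lns_append_of_one u hone
      have hbv : (stepB (best, p.reverse) x).1 = min best (((lns w0).length : Int) + 1) := by
        rw [hbval, if_pos hp1, hlnsp]
      have hrb : res = best := by
        rcases u with _ | ⟨a, u'⟩
        · obtain ⟨e1', e2'⟩ := h5 rfl; rw [e1', e2']
        · exact (h6 (by simp)).1
      obtain ⟨v, hv⟩ := lns_suffix w0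
      have hpu2 : p ++ [x] = (u ++ v) ++ lns w0 := by
        rw [hpu', List.append_assoc, ← hv]
      have huv : u ++ v ≠ [] := by
        intro he
        have hwhole : p ++ [x] = lns w0 := by rw [hpu2, he]; simp
        exact gl_lns_ne_one w0 (by rw [← hwhole]; exact hp1)
      exact ih (p ++ [x]) (u ++ v) (lns w0) res1 ((stepB (best, p.reverse) x).1) s2
        i2 i3 hpu2 (gl_lns_ne_one w0) i4
        (fun he => absurd he huv)
        (fun _ => ⟨by rw [hres1v, hbv, hrb], by rw [hres1v]; exact min_le_right _ _⟩)
        (by rw [← hrest]; exact h7)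
    · have hres1v : res1 = res := by
        rw [i1, if_pos (lns_eq_self hone)]
      have hi3 : W s2 = w0 := by rw [i3, lns_eq_self hone]
      have hi4 : s2.size = w0.length := by rw [i4, lns_eq_self hone]
      have hwlen : (w0.length : Int) = (w.length : Int) + 1 := by
        rw [hw0]; simp
      by_cases hp1 : gl (p ++ [x]) = 1
      · have hu : u ≠ [] := by
          intro he
          rw [he, List.nil_append] at hpu'
          exact hone (hpu' ▸ hp1)
        obtain ⟨hrb, hrle⟩ := h6 hu
        obtain ⟨v, hv⟩ := suffix_lns_of_ne_one u hone (w := w0)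
        rw [← hpu'] at hv
        have hlen : w0.length ≤ (lns (p ++ [x])).length := by
          rw [hv]; simp
        have hlen' : (w0.length : Int) ≤ ((lns (p ++ [x])).length : Int) := by
          exact_mod_cast hlen
        have hbv : (stepB (best, p.reverse) x).1 = best := by
          rw [hbval, if_pos hp1]
          exact min_eq_left (by omega)
        rw [hres1v, hbv]
        exact ih (p ++ [x]) u w0 res best s2 i2 hi3 hpu' hone hi4
          (fun he => absurd he hu)
          (fun _ => ⟨hrb, by omega⟩)
          (by rw [← hrest]; exact h7)
      · have hbv : (stepB (best, p.reverse) x).1 = best := by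
          rw [hbval, if_neg hp1]
        rw [hres1v, hbv]
        exact ih (p ++ [x]) u w0 res best s2 i2 hi3 hpu' hone hi4 h5
          (fun hu => ⟨(h6 hu).1, by
            have hle2 := (h6 hu).2
            omega⟩)
          (by rw [← hrest]; exact h7)

-- ===== VERDICT (by name: the statement is the Claim_ definition above) =====
theorem lc_6392_spec : Claim_equal_lc_6392 := by
  unfold Claim_equal_lc_6392
  intro nums _
  unfold Spec_lc_6392
  unfold lc_6392 lc_6392_alt
  by_cases hg : List.foldl pygcd 0 nums = 1
  · by_cases hc : (1 : Int) ∈ nums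
    · simp [hg, hc]
    · have hmain := joint nums [] [] [] INF INF ⟨[], [], [], [], 0, 0, 0⟩
        ⟨rfl, rfl, rfl, rfl⟩ rfl rfl (by simp [gl]) rfl
        (fun _ => ⟨rfl, rfl⟩) (fun hne => absurd rfl hne)
        (by simpa [gl] using hg)
      have hmain' : (List.foldl stepA (INF, (⟨[], [], [], [], 0, 0, 0⟩ : SWAS)) nums).1 =
          (List.foldl stepB (INF, ([] : List Int)) nums).1 := by simpa using hmain
      simp [hg, hc, hmain']
  · simp [hg]
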